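-- pv_equiv track=rewrite | github.com/DavidLiuPP/do-copy | load_scheduler/utility.py | finalize_prediction_label
-- ===== SOURCE A (Python) =====
-- from typing import Set
--
-- def finalize_prediction_label(next_move_labels):
--     # If only one label, return it directly
--     if len(next_move_labels) == 1:
--         return next_move_labels[0]
--
--     valid_actions = ['Pull', 'Deliver', 'Return']
--     actions: Set[str] = set()
--     for label in next_move_labels:
--         # Split label by '-' and add each valid action
--         for action in label.split('-'):
--             action = action.strip()  # Remove any whitespace
--             if action in valid_actions:
--                 actions.add(action)
--
--     # sort actions in ['Pull', 'Deliver', 'Return'] this order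
--     actions = sorted(actions, key=lambda x: valid_actions.index(x))
--     predicted_next_move = '-'.join(actions)
--
--     if predicted_next_move == 'Pull':
--         predicted_next_move = 'Pre-Pull'
--
--     return predicted_next_move
-- ===== SOURCE B (Python) =====
-- def finalize_prediction_label(next_move_labels):
--     # If only one label, return it directly
--     if len(next_move_labels) == 1:
--         return next_move_labels[0]
--
--     # Accumulate a 3-bit mask of which actions occur, then read the final
--     # string straight out of an 8-entry table (the Pre-Pull case included).
--     mask = 0
--     for label in next_move_labels:
--         for part in label.split('-'):
--             part = part.strip()
--             if part == 'Pull':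
--                 mask |= 1
--             elif part == 'Deliver':
--                 mask |= 2
--             elif part == 'Return':
--                 mask |= 4
--
--     return ['', 'Pre-Pull', 'Deliver', 'Pull-Deliver', 'Return', 'Pull-Return',
--             'Deliver-Return', 'Pull-Deliver-Return'][mask]
-- ===== Notes on version B (the rewrite author's own statement) =====
-- stated objective: alternative
-- what changed: B replaces A's set accumulation, index-keyed sort and join by a single pass that ORs a 3-bit presence mask and reads the final string, Pre-Pull rename included, from a fixed 8-entry table.
import Mathlib
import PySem

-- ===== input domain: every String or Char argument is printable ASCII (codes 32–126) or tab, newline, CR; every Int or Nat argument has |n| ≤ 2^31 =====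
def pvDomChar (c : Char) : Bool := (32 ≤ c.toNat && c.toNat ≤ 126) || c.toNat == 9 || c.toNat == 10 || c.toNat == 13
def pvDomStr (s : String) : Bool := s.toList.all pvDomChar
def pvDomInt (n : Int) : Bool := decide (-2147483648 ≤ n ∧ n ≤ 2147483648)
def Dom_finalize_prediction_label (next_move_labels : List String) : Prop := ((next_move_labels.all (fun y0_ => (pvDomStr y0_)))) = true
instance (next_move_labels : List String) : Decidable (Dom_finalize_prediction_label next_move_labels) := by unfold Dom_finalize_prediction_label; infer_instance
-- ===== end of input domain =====

-- B replaces A's set accumulation, index-keyed sort and join by a single pass that ORs a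
-- 3-bit presence mask and reads the result from a fixed 8-entry table (objective: alternative).


-- ===== PORT A =====
def pvValidActions : List String := ["Pull", "Deliver", "Return"]

def finalize_prediction_label (next_move_labels : List String) : String :=
  if next_move_labels.length = 1 then
    -- length = 1, so index 0 is in range: pyGetD is exact here
    PySem.List.pyGetD next_move_labels 0 ""
  else
    let actions : PySem.Set String :=
      next_move_labels.foldl (fun acc label =>
        ((PySem.Str.split? label "-").getD []).foldl (fun acc action =>
          let a := PySem.Str.strip action
          if a ∈ pvValidActions then PySem.Set.add acc a else acc) acc) PySem.Set.empty
    -- key = valid_actions.index(x): every set member is in pvValidActions, so .getD 0 is exact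
    let actionsSorted := PySem.List.sorted actions (fun x => ((PySem.List.index? pvValidActions x).getD 0 : Nat)) false
    let predicted := PySem.Str.join "-" actionsSorted
    if predicted = "Pull" then "Pre-Pull" else predicted

-- ===== PORT B =====
-- the body of B's inner loop: OR the bit of a (stripped) token into the mask
def pvMaskStep (m : Nat) (t : String) : Nat :=
  if t = "Pull" then m ||| 1
  else if t = "Deliver" then m ||| 2
  else if t = "Return" then m ||| 4
  else m

def pvTable : List String :=
  ["", "Pre-Pull", "Deliver", "Pull-Deliver", "Return", "Pull-Return",
   "Deliver-Return", "Pull-Deliver-Return"]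

def finalize_prediction_label_alt (next_move_labels : List String) : String :=
  if next_move_labels.length = 1 then
    PySem.List.pyGetD next_move_labels 0 ""
  else
    let mask : Nat :=
      next_move_labels.foldl (fun m label =>
        ((PySem.Str.split? label "-").getD []).foldl
          (fun m part => pvMaskStep m (PySem.Str.strip part)) m) 0
    -- mask is an OR of bits 1,2,4 starting from 0, hence 0 ≤ mask ≤ 7: Nat indexing is exact
    pvTable.getD mask ""

-- ===== PRECONDITION & SPEC =====
def Spec_finalize_prediction_label (next_move_labels : List String) (out : String) : Prop := out = finalize_prediction_label_alt next_move_labels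
instance (next_move_labels : List String) (out : String) : Decidable (Spec_finalize_prediction_label next_move_labels out) := by unfold Spec_finalize_prediction_label; infer_instance

-- ===== CLAIM (what is proved, stated in full; the proofs are below) =====
def Claim_equal_finalize_prediction_label : Prop := ∀ (next_move_labels : List String), Dom_finalize_prediction_label next_move_labels → Spec_finalize_prediction_label next_move_labels (finalize_prediction_label next_move_labels)

-- ===== LEMMAS AND PROOFS =====

-- the stripped tokens of all labels, in order (shared description of both loops' data)
def pvTokens (labels : List String) : List String :=
  labels.flatMap (fun label => ((PySem.Str.split? label "-").getD []).map PySem.Str.strip)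

-- A, inner loop: stripping-and-conditionally-adding is adding the stripped tokens that are valid
theorem pv_inner (l : List String) (acc : PySem.Set String) :
    l.foldl (fun acc action =>
        let a := PySem.Str.strip action
        if a ∈ pvValidActions then PySem.Set.add acc a else acc) acc
    = ((l.map PySem.Str.strip).filter (fun a => decide (a ∈ pvValidActions))).foldl PySem.Set.add acc := by
  induction l generalizing acc with
  | nil => rfl
  | cons x l ih =>
    by_cases hx : PySem.Str.strip x ∈ pvValidActions <;>
      simp [hx, ih]

-- A, outer loop: the whole accumulation adds every valid stripped token of every label
theorem pv_outer (labels : List String) (acc : PySem.Set String) :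
    labels.foldl (fun acc label =>
        ((PySem.Str.split? label "-").getD []).foldl (fun acc action =>
          let a := PySem.Str.strip action
          if a ∈ pvValidActions then PySem.Set.add acc a else acc) acc) acc
    = ((pvTokens labels).filter (fun a => decide (a ∈ pvValidActions))).foldl PySem.Set.add acc := by
  induction labels generalizing acc with
  | nil => rfl
  | cons x labels ih =>
    simp only [pvTokens, List.foldl_cons, List.flatMap_cons, List.filter_append, List.foldl_append]
    rw [pv_inner, ih]; rfl

-- A's set of actions is exactly set( [t for t in stripped tokens if t in valid] )
theorem pv_set_eq (labels : List String) :
    labels.foldl (fun acc label =>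
        ((PySem.Str.split? label "-").getD []).foldl (fun acc action =>
          let a := PySem.Str.strip action
          if a ∈ pvValidActions then PySem.Set.add acc a else acc) acc) PySem.Set.empty
    = PySem.Set.ofList ((pvTokens labels).filter (fun a => decide (a ∈ pvValidActions))) := by
  rw [PySem.Set.ofList_eq_foldl]
  exact pv_outer labels PySem.Set.empty

-- A: the sorted set equals the canonical-order filter
theorem pv_sorted_eq (tokens : List String) :
    PySem.List.sorted (PySem.Set.ofList (tokens.filter (fun a => decide (a ∈ pvValidActions))))
        (fun x => ((PySem.List.index? pvValidActions x).getD 0 : Nat)) false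
    = pvValidActions.filter (fun a => tokens.contains a) := by
  apply PySem.List.sorted_eq_of_perm_of_pairwise_lt
  · rw [List.perm_ext_iff_of_nodup (List.Nodup.filter _ (by decide)) (PySem.Set.nodup_ofList _)]
    intro x
    simp only [List.mem_filter, PySem.Set.mem_ofList, List.contains_iff_mem]
    simp [And.comm]
  · exact List.Pairwise.filter _ (by decide)

-- B: one mask step from m is m OR'd with the step from 0
theorem pv_maskStep_shift (m : Nat) (t : String) : pvMaskStep m t = m ||| pvMaskStep 0 t := by
  unfold pvMaskStep
  split_ifs <;> simp

-- B: folding mask steps from m is m OR'd with the fold from 0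
theorem pv_maskFold_shift (ts : List String) (m : Nat) :
    ts.foldl pvMaskStep m = m ||| ts.foldl pvMaskStep 0 := by
  induction ts generalizing m with
  | nil => simp
  | cons t ts ih =>
    simp only [List.foldl_cons]
    rw [ih (pvMaskStep m t), ih (pvMaskStep 0 t),
      pv_maskStep_shift m t, Nat.lor_assoc]

-- B's nested loop computes the fold of mask steps over all stripped tokens
theorem pv_mask_eq (labels : List String) (m : Nat) :
    labels.foldl (fun m label =>
        ((PySem.Str.split? label "-").getD []).foldl
          (fun m part => pvMaskStep m (PySem.Str.strip part)) m) m
    = (pvTokens labels).foldl pvMaskStep m := by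
  induction labels generalizing m with
  | nil => rfl
  | cons x labels ih =>
    simp only [pvTokens, List.foldl_cons, List.flatMap_cons, List.foldl_append,
      List.foldl_map] at *
    rw [ih]

-- the mask is determined by which of the three actions occur among the tokens
theorem pv_mask_val (ts : List String) :
    ts.foldl pvMaskStep 0
    = (if "Pull" ∈ ts then 1 else 0) ||| (if "Deliver" ∈ ts then 2 else 0)
        ||| (if "Return" ∈ ts then 4 else 0) := by
  induction ts with
  | nil => decide
  | cons t ts ih =>
    simp only [List.foldl_cons]
    rw [pv_maskFold_shift, ih]
    by_cases h1 : t = "Pull" <;> by_cases h2 : t = "Deliver" <;> by_cases h3 : t = "Return" <;>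
      by_cases m1 : "Pull" ∈ ts <;> by_cases m2 : "Deliver" ∈ ts <;> by_cases m3 : "Return" ∈ ts <;>
        simp [pvMaskStep, h1, h2, h3, m1, m2, m3, List.mem_cons, eq_comm]

-- ===== VERDICT (by name: the statement is the Claim_ definition above) =====
theorem finalize_prediction_label_spec : Claim_equal_finalize_prediction_label := by
  intro xs _
  unfold Spec_finalize_prediction_label finalize_prediction_label finalize_prediction_label_alt
  by_cases h : xs.length = 1
  · simp [h]
  · simp only [h, if_false]
    rw [pv_set_eq, pv_sorted_eq, pv_mask_eq, pv_mask_val]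
    by_cases m1 : "Pull" ∈ pvTokens xs <;> by_cases m2 : "Deliver" ∈ pvTokens xs <;>
      by_cases m3 : "Return" ∈ pvTokens xs <;>
        simp [m1, m2, m3, pvValidActions, pvTable] <;> decide
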